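-- pv_equiv track=rewrite | github.com/kaycexu/trail | trail/turns.py | _strip_user_echo_tail
-- ===== SOURCE A (Python) =====
-- def _collapse_inline_text(text: str) -> str:
--     return "".join(text.split()).lower()
--
-- def _strip_user_echo_tail(assistant_lines: list[str], pending_user: str) -> list[str]:
--     prompt_flat = _collapse_inline_text(pending_user)
--     if not prompt_flat:
--         return assistant_lines
--
--     assistant_flats = [_collapse_inline_text(line) for line in assistant_lines]
--     candidate = ""
--     cut_index: int | None = None
--     for index in range(len(assistant_flats) - 1, -1, -1):
--         flat = assistant_flats[index]
--         if not flat: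
--             continue
--         candidate = flat + candidate
--         if len(candidate) > len(prompt_flat):
--             break
--         if prompt_flat.endswith(candidate):
--             if len(candidate) >= 8:
--                 cut_index = index
--             continue
--         if candidate not in prompt_flat:
--             break
--
--     if cut_index is None:
--         return assistant_lines
--     return assistant_lines[:cut_index]
-- ===== SOURCE B (Python) =====
-- def _strip_user_echo_tail(assistant_lines: list[str], pending_user: str) -> list[str]:
--     prompt_flat = "".join(pending_user.split()).lower()
--     if not prompt_flat:
--         return assistant_lines
--     pos = len(prompt_flat)  # prompt_flat[pos:] is the suffix matched so far
--     cut_index = None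
--     for index in range(len(assistant_lines) - 1, -1, -1):
--         flat = "".join(assistant_lines[index].split()).lower()
--         if not flat:
--             continue
--         if len(flat) > pos or prompt_flat[pos - len(flat):pos] != flat:
--             break
--         pos -= len(flat)
--         if len(prompt_flat) - pos >= 8:
--             cut_index = index
--     if cut_index is None:
--         return assistant_lines
--     return assistant_lines[:cut_index]
-- ===== Notes on version B (the rewrite author's own statement) =====
-- stated objective: faster
-- what changed: Instead of growing a candidate string and rescanning the prompt with endswith/'in' on every line, B keeps a single suffix-position pointer into the collapsed prompt and compares each collapsed line against one slice, dropping A's dead substring-continue branch.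
import Mathlib
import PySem

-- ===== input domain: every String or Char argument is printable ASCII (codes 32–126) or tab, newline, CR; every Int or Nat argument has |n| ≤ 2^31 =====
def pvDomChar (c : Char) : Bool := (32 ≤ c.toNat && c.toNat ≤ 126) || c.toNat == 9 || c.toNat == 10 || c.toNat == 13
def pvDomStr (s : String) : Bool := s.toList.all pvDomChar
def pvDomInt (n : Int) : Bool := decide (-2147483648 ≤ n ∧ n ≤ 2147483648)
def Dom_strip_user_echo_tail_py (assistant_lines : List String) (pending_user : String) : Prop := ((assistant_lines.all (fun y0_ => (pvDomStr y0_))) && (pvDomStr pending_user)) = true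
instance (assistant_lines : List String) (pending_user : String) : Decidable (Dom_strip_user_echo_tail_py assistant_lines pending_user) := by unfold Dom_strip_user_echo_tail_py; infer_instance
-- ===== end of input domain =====

-- B replaces A's growing candidate string plus endswith/substring scans by a single
-- suffix-position pointer into the collapsed prompt (alternative/faster mechanism measured by the check).

-- _collapse_inline_text(text) = "".join(text.split()).lower(), shared verbatim by both Pythons
def pvCollapse (s : String) : List Char :=
  PySem.Chars.lower (PySem.Chars.join [] (PySem.Chars.split₀ s.toList))

-- ===== PORT A =====
-- A's loop: range(len-1,-1,-1) over precomputed flats = the reversed zipIdx list;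
-- state (candidate, cut_index) exactly as in the Python.
def pvLoopA (prompt : List Char) : List (List Char × Nat) → List Char → Option Nat → Option Nat
  | [], _, cut => cut
  | (flat, i) :: rest, candidate, cut =>
    if flat = [] then pvLoopA prompt rest candidate cut
    else
      let cand := flat ++ candidate
      if prompt.length < cand.length then cut
      else if PySem.Chars.endswith prompt cand then
        pvLoopA prompt rest cand (if 8 ≤ cand.length then some i else cut)
      else if PySem.Chars.isIn cand prompt then
        pvLoopA prompt rest cand cut
      else cut

def strip_user_echo_tail_py (assistant_lines : List String) (pending_user : String) : List String :=
  let prompt := pvCollapse pending_user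
  if prompt = [] then assistant_lines
  else
    let flats := assistant_lines.map pvCollapse
    match pvLoopA prompt flats.zipIdx.reverse [] none with
    | none => assistant_lines
    | some i => assistant_lines.take i

-- ===== PORT B =====
-- B's loop: same reversed index walk, but the state is a position pos into the collapsed
-- prompt (prompt[pos:] is the suffix matched so far); each line is collapsed inside the loop
-- and compared against the slice prompt[pos-len(flat):pos].
def pvLoopB (prompt : List Char) : List (String × Nat) → Nat → Option Nat → Option Nat
  | [], _, cut => cut
  | (line, i) :: rest, pos, cut =>
    let flat := pvCollapse line
    if flat = [] then pvLoopB prompt rest pos cut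
    else if pos < flat.length then cut
    else if PySem.List.slice prompt (some ((pos : Int) - (flat.length : Int))) (some (pos : Int)) ≠ flat then cut
    else
      let pos' := pos - flat.length
      pvLoopB prompt rest pos' (if 8 ≤ prompt.length - pos' then some i else cut)

def strip_user_echo_tail_py_alt (assistant_lines : List String) (pending_user : String) : List String :=
  let prompt := pvCollapse pending_user
  if prompt = [] then assistant_lines
  else
    match pvLoopB prompt assistant_lines.zipIdx.reverse prompt.length none with
    | none => assistant_lines
    | some i => assistant_lines.take i

-- ===== PRECONDITION & SPEC =====
def Spec_strip_user_echo_tail_py (assistant_lines : List String) (pending_user : String) (out : List String) : Prop := out = strip_user_echo_tail_py_alt assistant_lines pending_user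
instance (assistant_lines : List String) (pending_user : String) (out : List String) : Decidable (Spec_strip_user_echo_tail_py assistant_lines pending_user out) := by unfold Spec_strip_user_echo_tail_py; infer_instance

-- ===== CLAIM (what is proved, stated in full; the proofs are below) =====
def Claim_equal_strip_user_echo_tail_py : Prop := ∀ (assistant_lines : List String) (pending_user : String), Dom_strip_user_echo_tail_py assistant_lines pending_user → Spec_strip_user_echo_tail_py assistant_lines pending_user (strip_user_echo_tail_py assistant_lines pending_user)

-- ===== LEMMAS AND PROOFS =====

-- 'flat ++ prompt[pos:]' is a suffix of prompt iff flat is a suffix of prompt[:pos]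
lemma pv_suffix_take (flat prompt : List Char) (pos : Nat) (hpos : pos ≤ prompt.length) :
    flat ++ prompt.drop pos <:+ prompt ↔ flat <:+ prompt.take pos := by
  constructor
  · rintro ⟨w, hw⟩
    refine ⟨w, ?_⟩
    have hlw : (w ++ flat).length = pos := by
      have := congrArg List.length hw
      simp only [List.length_append, List.length_drop] at this
      simp only [List.length_append]
      omega
    calc w ++ flat = ((w ++ flat) ++ prompt.drop pos).take pos := (List.take_left' hlw).symm
      _ = prompt.take pos := by rw [List.append_assoc, hw]
  · rintro ⟨w, hw⟩
    exact ⟨w, by rw [← List.append_assoc, hw, List.take_append_drop]⟩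

-- a suffix of prompt[:pos] of length |flat| is exactly the slice prompt[pos-|flat|:pos]
lemma pv_suffix_take_iff (flat prompt : List Char) (pos : Nat)
    (hfl : flat.length ≤ pos) (hpos : pos ≤ prompt.length) :
    flat <:+ prompt.take pos ↔ (prompt.drop (pos - flat.length)).take flat.length = flat := by
  have hlt : (prompt.take pos).length = pos := by simp [hpos]
  have hdt : (prompt.take pos).drop (pos - flat.length)
      = (prompt.drop (pos - flat.length)).take flat.length := by
    rw [List.drop_take]
    congr 1
    omega
  rw [List.suffix_iff_eq_drop, hlt, hdt, eq_comm]

-- once A's candidate is not a suffix of the prompt, the rest of A's loop can never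
-- change cut_index: the dead substring-continue branch.
lemma pvLoopA_dead (prompt : List Char) (pairs : List (List Char × Nat)) (cand : List Char)
    (cut : Option Nat) (h : ¬ cand <:+ prompt) : pvLoopA prompt pairs cand cut = cut := by
  induction pairs generalizing cand with
  | nil => rfl
  | cons p rest ih =>
    obtain ⟨flat, i⟩ := p
    simp only [pvLoopA]
    have hns : ¬ (flat ++ cand) <:+ prompt :=
      fun hc => h ((List.suffix_append flat cand).trans hc)
    by_cases h1 : flat = []
    · rw [if_pos h1]
      exact ih cand h
    · rw [if_neg h1]
      by_cases h2 : prompt.length < (flat ++ cand).length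
      · rw [if_pos h2]
      · rw [if_neg h2, if_neg (fun hc => hns ((PySem.Chars.endswith_iff _ _).mp hc))]
        by_cases h4 : PySem.Chars.isIn (flat ++ cand) prompt = true
        · rw [if_pos h4]
          exact ih _ hns
        · rw [if_neg h4]

-- the main simulation: when A's candidate is exactly prompt[pos:], A's loop and B's loop agree
lemma pv_loop_eq (prompt : List Char) (pairs : List (String × Nat)) (pos : Nat)
    (hpos : pos ≤ prompt.length) (cut : Option Nat) :
    pvLoopA prompt (pairs.map (fun p => (pvCollapse p.1, p.2))) (prompt.drop pos) cut
      = pvLoopB prompt pairs pos cut := by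
  induction pairs generalizing pos cut with
  | nil => rfl
  | cons p rest ih =>
    obtain ⟨line, i⟩ := p
    simp only [pvLoopA, pvLoopB, List.map_cons]
    set flat := pvCollapse line with hflat
    by_cases hfe : flat = []
    · rw [if_pos hfe, if_pos hfe]
      exact ih pos hpos cut
    · rw [if_neg hfe, if_neg hfe]
      have hdl : (prompt.drop pos).length = prompt.length - pos := by simp
      by_cases hlen : pos < flat.length
      · have hgt : prompt.length < (flat ++ prompt.drop pos).length := by
          simp only [List.length_append, hdl]; omega
        rw [if_pos hgt, if_pos hlen]
      · have hfl : flat.length ≤ pos := by omega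
        have hnotlen : ¬ prompt.length < (flat ++ prompt.drop pos).length := by
          simp only [List.length_append, hdl]; omega
        rw [if_neg hnotlen, if_neg hlen]
        -- the slice prompt[pos-|flat|:pos]
        have hslice : PySem.List.slice prompt (some ((pos : Int) - (flat.length : Int)))
            (some (pos : Int)) = (prompt.drop (pos - flat.length)).take flat.length := by
          have hc : ((pos : Int) - (flat.length : Int)) = ((pos - flat.length : Nat) : Int) := by
            omega
          rw [hc, PySem.List.slice_natCast]
          congr 1
          omega
        have hmatch : (PySem.Chars.endswith prompt (flat ++ prompt.drop pos) = true)
            ↔ (prompt.drop (pos - flat.length)).take flat.length = flat := by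
          rw [PySem.Chars.endswith_iff, pv_suffix_take flat prompt pos hpos,
            pv_suffix_take_iff flat prompt pos hfl hpos]
        rw [hslice]
        by_cases hm : (prompt.drop (pos - flat.length)).take flat.length = flat
        · have hcand : flat ++ prompt.drop pos = prompt.drop (pos - flat.length) := by
            conv_rhs => rw [← List.take_append_drop flat.length (prompt.drop (pos - flat.length))]
            rw [hm, List.drop_drop, show pos - flat.length + flat.length = pos by omega]
          have h8 : (flat ++ prompt.drop pos).length = prompt.length - (pos - flat.length) := by
            simp only [List.length_append, hdl]; omega
          have hne : ¬ ((prompt.drop (pos - flat.length)).take flat.length ≠ flat) :=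
            fun h => h hm
          rw [if_pos (hmatch.mpr hm), if_neg hne, h8, hcand]
          exact ih (pos - flat.length) (by omega) _
        · rw [if_neg (fun hc => hm (hmatch.mp hc)), if_pos hm]
          by_cases hin : PySem.Chars.isIn (flat ++ prompt.drop pos) prompt = true
          · rw [if_pos hin]
            exact pvLoopA_dead prompt _ _ cut (fun hsuf => hm
              ((pv_suffix_take_iff flat prompt pos hfl hpos).mp
                ((pv_suffix_take flat prompt pos hpos).mp hsuf)))
          · rw [if_neg hin]

-- ===== VERDICT (by name: the statement is the Claim_ definition above) =====
theorem strip_user_echo_tail_py_spec : Claim_equal_strip_user_echo_tail_py := by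
  intro lines pu _
  unfold Spec_strip_user_echo_tail_py strip_user_echo_tail_py strip_user_echo_tail_py_alt
  by_cases hp : pvCollapse pu = []
  · simp [hp]
  · simp only [if_neg hp]
    have hz : (lines.map pvCollapse).zipIdx.reverse
        = lines.zipIdx.reverse.map (fun p => (pvCollapse p.1, p.2)) := by
      rw [List.zipIdx_map, List.map_reverse]
      rfl
    rw [hz, show ([] : List Char) = (pvCollapse pu).drop (pvCollapse pu).length by simp,
      pv_loop_eq _ _ _ le_rfl]
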